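-- pv_equiv track=rewrite | github.com/jolieschae/Phase-3-Sims-4-Game-Mod | game/decompile/base/lib/encodings/punycode.py | selective_find
-- ===== SOURCE A (Python) =====
-- def selective_find(str, char, index, pos):
--     l = len(str)
--     while 1:
--         pos += 1
--         if pos == l:
--             return (-1, -1)
--         c = str[pos]
--         if c == char:
--             return (
--              index + 1, pos)
--         if c < char:
--             index += 1
-- ===== SOURCE B (Python) =====
-- def selective_find(str, char, index, pos):
--     l = len(str)
--     q = pos + 1
--     while q != l and str[q] != char:
--         q += 1
--     if q == l:
--         return (-1, -1)
--     c = sum(1 for p in range(pos + 1, q) if str[p] < char)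
--     return (index + 1 + c, q)
-- ===== Notes on version B (the rewrite author's own statement) =====
-- stated objective: alternative
-- what changed: A's single fused while-loop that mutates index while searching is replaced by two independent element-wise passes: first find q, the first position after pos holding char, then count the characters smaller than char in between and return (index+1+count, q).
import Mathlib
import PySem

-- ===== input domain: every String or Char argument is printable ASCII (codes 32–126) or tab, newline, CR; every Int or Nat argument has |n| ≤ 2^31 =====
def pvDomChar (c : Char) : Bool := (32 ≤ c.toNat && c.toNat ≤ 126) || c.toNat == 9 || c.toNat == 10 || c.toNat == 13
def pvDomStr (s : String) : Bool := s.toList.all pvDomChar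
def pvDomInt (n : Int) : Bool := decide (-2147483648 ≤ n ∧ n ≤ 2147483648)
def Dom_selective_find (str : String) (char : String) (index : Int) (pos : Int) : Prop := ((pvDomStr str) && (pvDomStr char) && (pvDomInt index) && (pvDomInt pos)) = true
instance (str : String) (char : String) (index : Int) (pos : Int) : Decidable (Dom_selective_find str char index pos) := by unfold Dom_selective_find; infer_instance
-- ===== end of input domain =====

-- B replaces A's fused search-and-count loop (which mutates index while scanning)
-- by two independent passes: a plain scan for the position q of the next
-- occurrence of char, then a count of the smaller characters before it;
-- alternative decomposition, same cost.


-- ===== PORT A =====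
-- the while-loop of A: pos is incremented, then the exit tests run in A's order.
-- The final `else` branch is Python's IndexError on str[pos] (excluded by
-- Pre_selective_find); the port's value there is arbitrary.
def selAloop (cs : List Char) (charL : List Char) (index : Int) (pos : Int) : Int × Int :=
  if pos + 1 = (cs.length : Int) then (-1, -1)
  else if h : PySem.Raise.InRange cs.length (pos + 1) then
    let c := PySem.List.pyGetD cs (pos + 1) 'a'
    if [c] = charL then (index + 1, pos + 1)
    else if PySem.Chars.strLt [c] charL then selAloop cs charL (index + 1) (pos + 1)
    else selAloop cs charL index (pos + 1)
  else (-1, -1)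
termination_by ((cs.length : Int) - pos).toNat
decreasing_by
  all_goals
    simp only [PySem.Raise.InRange] at h
    omega

def selective_find (str : String) (char : String) (index : Int) (pos : Int) : Int × Int :=
  selAloop str.toList char.toList index pos

-- ===== PORT B =====
-- first pass of Source B: `while q != l and str[q] != char: q += 1`; returns some q
-- on a match and none when q runs off the end (q = l). The final `else none`
-- is Python's IndexError on str[q] (excluded by Pre_selective_find).
def findQB (cs : List Char) (charL : List Char) (q : Int) : Option Int :=
  if q = (cs.length : Int) then none
  else if h : PySem.Raise.InRange cs.length q then
    let c := PySem.List.pyGetD cs q 'a'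
    if [c] = charL then some q else findQB cs charL (q + 1)
  else none
termination_by ((cs.length : Int) - q).toNat
decreasing_by
  simp only [PySem.Raise.InRange] at h
  omega

-- second pass of Source B: sum(1 for p in range(pos+1, q) if str[p] < char)
def countLtB (cs : List Char) (charL : List Char) (ps : List Int) : Int :=
  (ps.countP (fun p =>
    match PySem.List.pyGet? cs p with
    | some c => PySem.Chars.strLt [c] charL
    | none => false) : Nat)

def selective_find_alt (str : String) (char : String) (index : Int) (pos : Int) : Int × Int :=
  let cs := str.toList
  let charL := char.toList
  match findQB cs charL (pos + 1) with
  | none => (-1, -1)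
  | some q => (index + 1 + countLtB cs charL (PySem.List.pyRange (pos + 1) q 1), q)

-- ===== PRECONDITION & SPEC =====
-- Pre_ excludes exactly the inputs on which A (and B alike) raises IndexError:
-- pos ≥ len(str), where str[pos+1] is indexed before the exit test can fire,
-- and pos ≤ -len(str)-2, where the first access str[pos+1] is below Python's
-- negative-wraparound range.
def Pre_selective_find (str : String) (char : String) (index : Int) (pos : Int) : Prop :=
  -(str.length : Int) - 1 ≤ pos ∧ pos < (str.length : Int)
instance (str : String) (char : String) (index : Int) (pos : Int) : Decidable (Pre_selective_find str char index pos) := by unfold Pre_selective_find; infer_instance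

def pvWitness_selective_find : String × String × Int × Int := ("ab", "b", 0, -1)

def Spec_selective_find (str : String) (char : String) (index : Int) (pos : Int) (out : Int × Int) : Prop := out = selective_find_alt str char index pos
instance (str : String) (char : String) (index : Int) (pos : Int) (out : Int × Int) : Decidable (Spec_selective_find str char index pos out) := by unfold Spec_selective_find; infer_instance

-- ===== CLAIM (what is proved, stated in full; the proofs are below) =====
def Claim_equal_selective_find : Prop := ∀ (str : String) (char : String) (index : Int) (pos : Int), Dom_selective_find str char index pos → Pre_selective_find str char index pos → Spec_selective_find str char index pos (selective_find str char index pos)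

-- ===== LEMMAS AND PROOFS =====

lemma findQB_ge (cs charL : List Char) :
    ∀ (n : ℕ) (s q : Int), ((cs.length : Int) - s).toNat ≤ n →
    findQB cs charL s = some q → s ≤ q := by
  intro n
  induction n with
  | zero =>
    intro s q hfuel h
    rw [findQB] at h
    by_cases h0 : s = (cs.length : Int)
    · rw [if_pos h0] at h; exact absurd h (by simp)
    · rw [if_neg h0, dif_neg (by simp only [PySem.Raise.InRange]; omega)] at h
      exact absurd h (by simp)
  | succ n ih =>
    intro s q hfuel h
    rw [findQB] at h
    by_cases h0 : s = (cs.length : Int)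
    · rw [if_pos h0] at h; exact absurd h (by simp)
    · rw [if_neg h0] at h
      by_cases hin : PySem.Raise.InRange cs.length s
      · rw [dif_pos hin] at h
        obtain ⟨hin1, hin2⟩ := hin
        by_cases hc : [PySem.List.pyGetD cs s 'a'] = charL
        · rw [if_pos hc] at h
          simp only [Option.some.injEq] at h
          omega
        · rw [if_neg hc] at h
          have := ih (s + 1) q (by omega) h
          omega
      · rw [dif_neg hin] at h; exact absurd h (by simp)

lemma key (cs charL : List Char) :
    ∀ (n : ℕ) (pos index : Int), ((cs.length : Int) - pos).toNat ≤ n →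
    -(cs.length : Int) - 1 ≤ pos → pos < (cs.length : Int) →
    selAloop cs charL index pos =
      match findQB cs charL (pos + 1) with
      | none => (-1, -1)
      | some q => (index + 1 + countLtB cs charL (PySem.List.pyRange (pos + 1) q 1), q) := by
  intro n
  induction n with
  | zero => intro pos index hfuel _ h2; omega
  | succ n ih =>
    intro pos index hfuel h1 h2
    rw [selAloop, findQB]
    by_cases h0 : pos + 1 = (cs.length : Int)
    · simp only [if_pos h0]
    · have hin : PySem.Raise.InRange cs.length (pos + 1) := ⟨by omega, by omega⟩
      obtain ⟨c, hg⟩ : ∃ c, PySem.List.pyGet? cs (pos + 1) = some c := by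
        rcases ho : PySem.List.pyGet? cs (pos + 1) with _ | c
        · exact absurd hin ((PySem.List.pyGet?_eq_none_iff _ _).mp ho)
        · exact ⟨c, rfl⟩
      have hcD : PySem.List.pyGetD cs (pos + 1) 'a' = c := by
        rw [PySem.List.pyGetD, hg]; rfl
      simp only [if_neg h0, dif_pos hin, hcD]
      by_cases hceq : [c] = charL
      · simp only [if_pos hceq]
        rw [PySem.List.pyRange_one_eq_nil le_rfl]
        simp [countLtB]
      · simp only [if_neg hceq]
        have hih : ∀ idx : Int, selAloop cs charL idx (pos + 1) =
            match findQB cs charL (pos + 2) with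
            | none => (-1, -1)
            | some q => (idx + 1 + countLtB cs charL (PySem.List.pyRange (pos + 2) q 1), q) := by
          intro idx
          have := ih (pos + 1) idx (by omega) (by omega) (by omega)
          simpa [add_assoc] using this
        rw [show pos + 1 + 1 = pos + 2 from by ring]
        rcases hfq : findQB cs charL (pos + 2) with _ | q
        · by_cases hlt : PySem.Chars.strLt [c] charL = true
          · rw [if_pos hlt, hih, hfq]
          · rw [if_neg hlt, hih, hfq]
        · have hq2 : pos + 2 ≤ q :=
            findQB_ge cs charL ((cs.length : Int) - (pos + 2)).toNat (pos + 2) q le_rfl hfq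
          have hcount : countLtB cs charL (PySem.List.pyRange (pos + 1) q 1) =
              countLtB cs charL (PySem.List.pyRange (pos + 2) q 1) +
                (if PySem.Chars.strLt [c] charL then 1 else 0) := by
            rw [PySem.List.pyRange_one_cons (by omega : pos + 1 < q)]
            simp only [countLtB, List.countP_cons, hg]
            rw [show pos + 1 + 1 = pos + 2 from by ring]
            split_ifs <;> push_cast <;> omega
          by_cases hlt : PySem.Chars.strLt [c] charL = true
          · rw [if_pos hlt, hih, hfq]
            dsimp only
            rw [hcount, if_pos hlt]
            ring_nf
          · rw [if_neg hlt, hih, hfq]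
            dsimp only
            rw [hcount, if_neg hlt]
            ring_nf

-- ===== VERDICT (by name: the statement is the Claim_ definition above) =====
theorem selective_find_spec : Claim_equal_selective_find := by
  intro str char index pos _hdom hpre
  unfold Spec_selective_find selective_find selective_find_alt
  rcases hpre with ⟨h1, h2⟩
  exact key str.toList char.toList ((str.toList.length : Int) - pos).toNat pos index le_rfl
    (by simpa using h1) (by simpa using h2)
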